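-- pv_equiv track=rewrite | github.com/MihaiAC/algorithms-and-data-structures | algo_practice/Random LC/MinimumScoreAfterEdgeRemovals.py | precompute_with_dfs
-- ===== SOURCE A (Python) =====
-- from typing import Dict, List, Tuple, Set
-- from collections import defaultdict, deque
--
-- def precompute_with_dfs(
--     nums: List[int],
--     children: Dict[int, List[int]]
-- ) -> Tuple[Dict[int, int], Dict[int, Set[int]]]:
--
--     subtree_xor = {}
--     descendants = defaultdict(set)
--
--     def dfs(node: int) -> Tuple[int, Set[int]]:
--         current_xor = nums[node]
--         current_descendants = set()
--
--         for child in children[node]: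
--             child_xor, child_descendants = dfs(child)
--
--             current_xor ^= child_xor
--             current_descendants.update(child_descendants)
--             current_descendants.add(child)
--
--         # Store the final computed values for this node.
--         subtree_xor[node] = current_xor
--         descendants[node] = current_descendants
--
--         return current_xor, current_descendants
--
--     dfs(0)
--     return subtree_xor, descendants
-- ===== SOURCE B (Python) =====
-- from collections import defaultdict
--
-- def precompute_with_dfs(nums, children):
--     subtree_xor = {}
--     descendants = defaultdict(set)
--
--     # Explicit stack of frames replacing the recursion:
--     # frame = [node, current_xor, current_descendants, remaining_children]
--     stack = [[0, nums[0], set(), list(children[0])]]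
--     while stack:
--         frame = stack[-1]
--         if frame[3]:
--             child = frame[3].pop(0)
--             stack.append([child, nums[child], set(), list(children[child])])
--         else:
--             stack.pop()
--             node, cur, desc = frame[0], frame[1], frame[2]
--             subtree_xor[node] = cur
--             descendants[node] = desc
--             if stack:
--                 parent = stack[-1]
--                 parent[1] ^= cur
--                 parent[2] |= desc
--                 parent[2].add(node)
--     return subtree_xor, descendants
-- ===== Notes on version B (the rewrite author's own statement) =====
-- stated objective: alternative
-- what changed: The recursive DFS is replaced by an iterative loop over an explicit stack of frames (node, running xor, running descendant set, remaining children), pushing a child frame while children remain and merging a finished frame into its parent on pop.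
import Mathlib
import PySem

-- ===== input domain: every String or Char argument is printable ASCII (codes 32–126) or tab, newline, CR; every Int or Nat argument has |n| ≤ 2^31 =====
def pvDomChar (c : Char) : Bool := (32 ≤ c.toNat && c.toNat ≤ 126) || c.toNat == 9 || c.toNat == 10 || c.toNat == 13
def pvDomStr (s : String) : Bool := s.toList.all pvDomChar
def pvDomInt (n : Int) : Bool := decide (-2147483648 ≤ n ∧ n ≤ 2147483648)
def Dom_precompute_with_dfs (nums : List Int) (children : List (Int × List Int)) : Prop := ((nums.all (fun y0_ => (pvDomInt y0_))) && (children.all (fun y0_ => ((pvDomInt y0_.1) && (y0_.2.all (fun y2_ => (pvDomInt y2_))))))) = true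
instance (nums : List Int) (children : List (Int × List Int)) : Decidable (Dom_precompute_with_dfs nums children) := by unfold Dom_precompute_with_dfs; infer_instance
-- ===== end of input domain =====

-- B replaces A's recursive DFS by an iterative loop over an explicit stack of frames;
-- the claim is about the RETURN value only (neither program mutates its arguments).

-- ===== PORT A =====
-- A's recursion carries the two result dicts; the fuel (flatMap length + 1 bounds the
-- recursion depth on the inputs admitted by Pre_) makes it total.
mutual
def pvDfsA (nums : List Int) (cd : PySem.Dict Int (List Int)) :
    Nat → Int → PySem.Dict Int Int → PySem.Dict Int (PySem.Set Int) →
    Option ((Int × PySem.Set Int) × PySem.Dict Int Int × PySem.Dict Int (PySem.Set Int))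
  | 0, _, _, _ => none
  | fuel+1, node, sx, ds =>
    match PySem.List.pyGet? nums node with
    | none => none                     -- IndexError
    | some v =>
      match cd.get? node with
      | none => none                   -- KeyError
      | some cs =>
        match pvLoopA nums cd fuel cs (v, PySem.Set.empty, sx, ds) with
        | none => none
        | some (x, d, sx', ds') => some ((x, d), sx'.insert node x, ds'.insert node d)
termination_by fuel _ _ _ => (fuel, 0)

def pvLoopA (nums : List Int) (cd : PySem.Dict Int (List Int)) :
    Nat → List Int →
    (Int × PySem.Set Int × PySem.Dict Int Int × PySem.Dict Int (PySem.Set Int)) →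
    Option (Int × PySem.Set Int × PySem.Dict Int Int × PySem.Dict Int (PySem.Set Int))
  | _, [], acc => some acc
  | fuel, c :: cs, (x, d, sx, ds) =>
    match pvDfsA nums cd fuel c sx ds with
    | none => none
    | some ((cx, cdv), sx', ds') =>
      pvLoopA nums cd fuel cs (PySem.Int.bxor x cx, (PySem.Set.union d cdv).add c, sx', ds')
termination_by fuel cs _ => (fuel, cs.length + 1)
end

def precompute_with_dfs (nums : List Int) (children : List (Int × List Int)) :
    (List (Int × Int)) × (List (Int × List Int)) :=
  match pvDfsA nums (PySem.Dict.mk children) ((children.flatMap Prod.snd).length + 1) 0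
      PySem.Dict.empty PySem.Dict.empty with
  | some (_, sx, ds) => (sx.items, ds.items)
  | none => ([], [])

-- ===== PORT B =====
-- while stack: look at the top frame; push a frame for its next remaining child, or pop
-- it, store its results and merge them into the parent frame.  Fuel bounds the number of
-- loop iterations (each node completion is a push plus a pop); on Pre_ inputs the loop
-- finishes well inside it.
def pvRunB (nums : List Int) (cd : PySem.Dict Int (List Int)) :
    Nat → List (Int × Int × PySem.Set Int × List Int) →
    PySem.Dict Int Int → PySem.Dict Int (PySem.Set Int) →
    Option (PySem.Dict Int Int × PySem.Dict Int (PySem.Set Int))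
  | _, [], sx, ds => some (sx, ds)
  | 0, _ :: _, _, _ => none
  | f+1, (node, cur, desc, crest) :: stk, sx, ds =>
    match crest with
    | c :: rest =>
      match PySem.List.pyGet? nums c, cd.get? c with    -- nums[child], children[child]
      | some v, some cs =>
        pvRunB nums cd f ((c, v, PySem.Set.empty, cs) :: (node, cur, desc, rest) :: stk) sx ds
      | _, _ => none                   -- IndexError / KeyError
    | [] =>
      match stk with
      | [] => some (sx.insert node cur, ds.insert node desc)
      | (p, px, pd, prest) :: stk' =>
        pvRunB nums cd f
          ((p, PySem.Int.bxor px cur, (PySem.Set.union pd desc).add node, prest) :: stk')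
          (sx.insert node cur) (ds.insert node desc)

def precompute_with_dfs_alt (nums : List Int) (children : List (Int × List Int)) :
    (List (Int × Int)) × (List (Int × List Int)) :=
  let cd := PySem.Dict.mk children
  match PySem.List.pyGet? nums 0, cd.get? 0 with        -- nums[0], children[0]
  | some v, some cs =>
    match pvRunB nums cd
        (2 * ((children.flatMap Prod.snd).length + 2) ^ ((children.flatMap Prod.snd).length + 1) + 1)
        [(0, v, PySem.Set.empty, cs)] PySem.Dict.empty PySem.Dict.empty with
    | some (sx, ds) => (sx.items, ds.items)
    | none => ([], [])
  | _, _ => ([], [])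

-- ===== PRECONDITION & SPEC =====
-- Saturation of a node set under the child map (dict lookup), used only to STATE Pre_.
def pvSatStep (cd : PySem.Dict Int (List Int)) (R : PySem.Set Int) : PySem.Set Int :=
  R.foldl (fun acc u => PySem.Set.update acc ((cd.get? u).getD [])) R

def pvSatIter (cd : PySem.Dict Int (List Int)) : Nat → PySem.Set Int → PySem.Set Int
  | 0, R => R
  | f+1, R => pvSatIter cd f (pvSatStep cd R)

-- nodes reachable from 0 through the dict
def pvReach (children : List (Int × List Int)) : PySem.Set Int :=
  pvSatIter (PySem.Dict.mk children) ((children.flatMap Prod.snd).length + 2) [0]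

-- strict descendants of v through the dict
def pvDescOf (children : List (Int × List Int)) (v : Int) : PySem.Set Int :=
  pvSatIter (PySem.Dict.mk children) ((children.flatMap Prod.snd).length + 2)
    (PySem.Set.ofList (((PySem.Dict.mk children).get? v).getD []))

-- Pre_ excludes exactly the inputs on which A does not return: a node reachable from 0
-- that is a missing key (KeyError), or whose nums index is out of range (IndexError), or
-- that lies on a cycle (the recursion never terminates).
def Pre_precompute_with_dfs (nums : List Int) (children : List (Int × List Int)) : Prop :=
  ∀ v ∈ pvReach children,
    ((PySem.Dict.mk children).get? v).isSome = true ∧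
    (PySem.List.pyGet? nums v).isSome = true ∧
    v ∉ pvDescOf children v
instance (nums : List Int) (children : List (Int × List Int)) : Decidable (Pre_precompute_with_dfs nums children) := by unfold Pre_precompute_with_dfs; infer_instance

def pvWitness_precompute_with_dfs : List Int × (List (Int × List Int)) :=
  ([1, 2, 3], [(0, [1, 2]), (1, []), (2, [1])])

def Spec_precompute_with_dfs (nums : List Int) (children : List (Int × List Int)) (out : (List (Int × Int)) × (List (Int × List Int))) : Prop := out = precompute_with_dfs_alt nums children
instance (nums : List Int) (children : List (Int × List Int)) (out : (List (Int × Int)) × (List (Int × List Int))) : Decidable (Spec_precompute_with_dfs nums children out) := by unfold Spec_precompute_with_dfs; infer_instance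

-- ===== CLAIM (what is proved, stated in full; the proofs are below) =====
def Claim_equal_precompute_with_dfs : Prop := ∀ (nums : List Int) (children : List (Int × List Int)), Dom_precompute_with_dfs nums children → Pre_precompute_with_dfs nums children → Spec_precompute_with_dfs nums children (precompute_with_dfs nums children)

-- ===== LEMMAS AND PROOFS =====

-- Reference computation: value / descendants / post-order triples of a subtree, dict-free.
mutual
def pvRef (nums : List Int) (cd : PySem.Dict Int (List Int)) :
    Nat → Int → Option (Int × PySem.Set Int × List (Int × Int × PySem.Set Int))
  | 0, _ => none
  | fuel+1, node =>
    match PySem.List.pyGet? nums node with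
    | none => none
    | some v =>
      match cd.get? node with
      | none => none
      | some cs =>
        match pvRefStep nums cd fuel cs (v, PySem.Set.empty) with
        | none => none
        | some (x, d, po) => some (x, d, po ++ [(node, x, d)])
termination_by fuel _ => (fuel, 0)

def pvRefStep (nums : List Int) (cd : PySem.Dict Int (List Int)) :
    Nat → List Int → (Int × PySem.Set Int) →
    Option (Int × PySem.Set Int × List (Int × Int × PySem.Set Int))
  | _, [], (x, d) => some (x, d, [])
  | fuel, c :: cs, (x, d) =>
    match pvRef nums cd fuel c with
    | none => none
    | some (cx, cdv, cpo) =>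
      match pvRefStep nums cd fuel cs (PySem.Int.bxor x cx, (PySem.Set.union d cdv).add c) with
      | none => none
      | some (x', d', po') => some (x', d', cpo ++ po')
termination_by fuel cs _ => (fuel, cs.length + 1)
end

def pvInsX (po : List (Int × Int × PySem.Set Int)) (m : PySem.Dict Int Int) : PySem.Dict Int Int :=
  po.foldl (fun m t => m.insert t.1 t.2.1) m

def pvInsD (po : List (Int × Int × PySem.Set Int)) (m : PySem.Dict Int (PySem.Set Int)) : PySem.Dict Int (PySem.Set Int) :=
  po.foldl (fun m t => m.insert t.1 t.2.2) m

theorem pvInsX_append (po1 po2 : List (Int × Int × PySem.Set Int)) (m : PySem.Dict Int Int) :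
    pvInsX (po1 ++ po2) m = pvInsX po2 (pvInsX po1 m) := by
  simp [pvInsX, List.foldl_append]

theorem pvInsD_append (po1 po2 : List (Int × Int × PySem.Set Int)) (m : PySem.Dict Int (PySem.Set Int)) :
    pvInsD (po1 ++ po2) m = pvInsD po2 (pvInsD po1 m) := by
  simp [pvInsD, List.foldl_append]

theorem pvInsX_singleton (t : Int × Int × PySem.Set Int) (m : PySem.Dict Int Int) :
    pvInsX [t] m = m.insert t.1 t.2.1 := rfl

theorem pvInsD_singleton (t : Int × Int × PySem.Set Int) (m : PySem.Dict Int (PySem.Set Int)) :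
    pvInsD [t] m = m.insert t.1 t.2.2 := rfl

-- A computes, via its threaded dicts, exactly the insertions of the reference post-order.
theorem pv_achar (nums : List Int) (cd : PySem.Dict Int (List Int)) :
    ∀ f : Nat,
      (∀ n sx ds, pvDfsA nums cd f n sx ds =
        (pvRef nums cd f n).map (fun r => ((r.1, r.2.1), pvInsX r.2.2 sx, pvInsD r.2.2 ds))) ∧
      (∀ cs x d sx ds, pvLoopA nums cd f cs (x, d, sx, ds) =
        (pvRefStep nums cd f cs (x, d)).map (fun r => (r.1, r.2.1, pvInsX r.2.2 sx, pvInsD r.2.2 ds))) := by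
  intro f
  induction f with
  | zero =>
    refine ⟨by intro n sx ds; rw [pvDfsA, pvRef]; rfl, ?_⟩
    intro cs x d sx ds
    match cs with
    | [] => rw [pvLoopA, pvRefStep]; rfl
    | c :: cs => rw [pvLoopA, pvRefStep, pvDfsA, pvRef]; rfl
  | succ f ih =>
    obtain ⟨ihR, ihS⟩ := ih
    have hR : ∀ n sx ds, pvDfsA nums cd (f+1) n sx ds =
        (pvRef nums cd (f+1) n).map (fun r => ((r.1, r.2.1), pvInsX r.2.2 sx, pvInsD r.2.2 ds)) := by
      intro n sx ds
      rw [pvDfsA, pvRef]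
      cases hg : PySem.List.pyGet? nums n with
      | none => rfl
      | some v =>
        cases hc : cd.get? n with
        | none => rfl
        | some cs =>
          simp only [PySem.Set.empty_eq, ihS cs v [] sx ds]
          cases hs : pvRefStep nums cd f cs (v, ([] : PySem.Set Int)) with
          | none => rfl
          | some r' =>
            obtain ⟨x, d, po⟩ := r'
            simp [pvInsX_append, pvInsD_append, pvInsX_singleton, pvInsD_singleton]
    refine ⟨hR, ?_⟩
    intro cs
    induction cs with
    | nil => intro x d sx ds; rw [pvLoopA, pvRefStep]; rfl
    | cons c cs ihc =>
      intro x d sx ds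
      rw [pvLoopA, pvRefStep]
      simp only [hR c sx ds]
      cases hrc : pvRef nums cd (f+1) c with
      | none => rfl
      | some rc =>
        obtain ⟨cx, cdv, cpo⟩ := rc
        simp only [Option.map_some]
        cases hs : pvRefStep nums cd (f+1) cs (PySem.Int.bxor x cx, (PySem.Set.union d cdv).add c) with
        | none => simp [ihc, hs]
        | some r2 =>
          obtain ⟨x2, d2, po2⟩ := r2
          simp [ihc, hs, pvInsX_append, pvInsD_append]

-- one-step reductions of the machine
theorem pvRunB_push (nums : List Int) (cd : PySem.Dict Int (List Int)) (f : Nat)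
    (node cur : Int) (desc : PySem.Set Int) (c : Int) (rest : List Int)
    (stk : List (Int × Int × PySem.Set Int × List Int))
    (sx : PySem.Dict Int Int) (ds : PySem.Dict Int (PySem.Set Int))
    {v : Int} {cs : List Int}
    (hg : PySem.List.pyGet? nums c = some v) (hc : cd.get? c = some cs) :
    pvRunB nums cd (f + 1) ((node, cur, desc, c :: rest) :: stk) sx ds =
    pvRunB nums cd f ((c, v, ([] : PySem.Set Int), cs) :: (node, cur, desc, rest) :: stk) sx ds := by
  rw [pvRunB, hg, hc]
  rfl

theorem pvRunB_pop_cons (nums : List Int) (cd : PySem.Dict Int (List Int)) (f : Nat)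
    (node cur : Int) (desc : PySem.Set Int) (p px : Int) (pd : PySem.Set Int) (prest : List Int)
    (stk' : List (Int × Int × PySem.Set Int × List Int))
    (sx : PySem.Dict Int Int) (ds : PySem.Dict Int (PySem.Set Int)) :
    pvRunB nums cd (f + 1) ((node, cur, desc, []) :: (p, px, pd, prest) :: stk') sx ds =
    pvRunB nums cd f ((p, PySem.Int.bxor px cur, (PySem.Set.union pd desc).add node, prest) :: stk')
      (sx.insert node cur) (ds.insert node desc) := by
  rw [pvRunB]

theorem pvRunB_pop_last (nums : List Int) (cd : PySem.Dict Int (List Int)) (f : Nat)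
    (node cur : Int) (desc : PySem.Set Int)
    (sx : PySem.Dict Int Int) (ds : PySem.Dict Int (PySem.Set Int)) :
    pvRunB nums cd (f + 1) [(node, cur, desc, [])] sx ds =
    some (sx.insert node cur, ds.insert node desc) := by
  rw [pvRunB]

-- B's stack machine simulates the reference computation step for step.
theorem pv_sim (nums : List Int) (cd : PySem.Dict Int (List Int)) :
    ∀ f : Nat,
      (∀ n x d po, pvRef nums cd f n = some (x, d, po) →
        ∀ p px pd rest stk sx ds g,
          pvRunB nums cd (2 * po.length + g) ((p, px, pd, n :: rest) :: stk) sx ds =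
          pvRunB nums cd g
            ((p, PySem.Int.bxor px x, (PySem.Set.union pd d).add n, rest) :: stk)
            (pvInsX po sx) (pvInsD po ds)) ∧
      (∀ cs x d x1 d1 po, pvRefStep nums cd f cs (x, d) = some (x1, d1, po) →
        ∀ node stk sx ds g,
          pvRunB nums cd (2 * po.length + g) ((node, x, d, cs) :: stk) sx ds =
          pvRunB nums cd g ((node, x1, d1, []) :: stk) (pvInsX po sx) (pvInsD po ds)) := by
  intro f
  induction f with
  | zero =>
    refine ⟨by intro n x d po h; rw [pvRef] at h; simp at h, ?_⟩
    intro cs x d x1 d1 po h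
    match cs with
    | [] =>
      rw [pvRefStep] at h
      simp only [Option.some.injEq, Prod.mk.injEq] at h
      obtain ⟨h1, h2, h3⟩ := h
      subst h1; subst h2; subst h3
      intro node stk sx ds g
      simp [pvInsX, pvInsD]
    | c :: cs' => rw [pvRefStep, pvRef] at h; simp at h
  | succ f ih =>
    obtain ⟨ihR, ihS⟩ := ih
    have hR : ∀ n x d po, pvRef nums cd (f+1) n = some (x, d, po) →
        ∀ p px pd rest stk sx ds g,
          pvRunB nums cd (2 * po.length + g) ((p, px, pd, n :: rest) :: stk) sx ds =
          pvRunB nums cd g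
            ((p, PySem.Int.bxor px x, (PySem.Set.union pd d).add n, rest) :: stk)
            (pvInsX po sx) (pvInsD po ds) := by
      intro n x d po h
      rw [pvRef] at h
      cases hg : PySem.List.pyGet? nums n with
      | none => simp [hg] at h
      | some v =>
        cases hc : cd.get? n with
        | none => simp [hg, hc] at h
        | some cs =>
          cases hs : pvRefStep nums cd f cs (v, ([] : PySem.Set Int)) with
          | none => simp [hg, hc, PySem.Set.empty_eq, hs] at h
          | some r' =>
            obtain ⟨x0, d0, po0⟩ := r'
            simp only [hg, hc, PySem.Set.empty_eq, hs, Option.some.injEq, Prod.mk.injEq] at h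
            obtain ⟨h1, h2, h3⟩ := h
            subst h1; subst h2; subst h3
            intro p px pd rest stk sx ds g
            have hlen : 2 * (po0 ++ [(n, x0, d0)]).length + g = (2 * po0.length + (g + 1)) + 1 := by
              simp; omega
            have hstep := ihS cs v ([] : PySem.Set Int) x0 d0 po0 hs n
              ((p, px, pd, rest) :: stk) sx ds (g + 1)
            rw [hlen, pvRunB_push nums cd _ p px pd n rest stk sx ds hg hc, hstep,
              pvRunB_pop_cons, pvInsX_append, pvInsD_append, pvInsX_singleton, pvInsD_singleton]
    refine ⟨hR, ?_⟩
    intro cs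
    induction cs with
    | nil =>
      intro x d x1 d1 po h
      rw [pvRefStep] at h
      simp only [Option.some.injEq, Prod.mk.injEq] at h
      obtain ⟨h1, h2, h3⟩ := h
      subst h1; subst h2; subst h3
      intro node stk sx ds g
      simp [pvInsX, pvInsD]
    | cons c cs' ihc =>
      intro x d x1 d1 po h
      rw [pvRefStep] at h
      cases hrc : pvRef nums cd (f+1) c with
      | none => simp [hrc] at h
      | some rc =>
        obtain ⟨cx, cdv, cpo⟩ := rc
        cases hs : pvRefStep nums cd (f+1) cs' (PySem.Int.bxor x cx, (PySem.Set.union d cdv).add c) with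
        | none => simp [hrc, hs] at h
        | some r2 =>
          obtain ⟨x2, d2, po2⟩ := r2
          simp only [hrc, hs, Option.some.injEq, Prod.mk.injEq] at h
          obtain ⟨h1, h2, h3⟩ := h
          subst h1; subst h2; subst h3
          intro node stk sx ds g
          have hlen : 2 * (cpo ++ po2).length + g = 2 * cpo.length + (2 * po2.length + g) := by
            simp; omega
          rw [hlen, hR c cx cdv cpo hrc node x d cs' stk sx ds (2 * po2.length + g),
            ihc _ _ _ _ _ hs node stk _ _ g, pvInsX_append, pvInsD_append]

-- pvRef produces at most (|flatMap| + 1)^fuel post-order entries (used to size B's fuel).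
theorem pv_len (nums : List Int) (children : List (Int × List Int)) :
    ∀ f : Nat,
      (∀ n x d po, pvRef nums (PySem.Dict.mk children) f n = some (x, d, po) →
        po.length ≤ ((children.flatMap Prod.snd).length + 1) ^ f) ∧
      (∀ cs a x d po, (∀ c ∈ cs, c ∈ children.flatMap Prod.snd) →
        pvRefStep nums (PySem.Dict.mk children) f cs a = some (x, d, po) →
        po.length ≤ cs.length * ((children.flatMap Prod.snd).length + 1) ^ f) := by
  intro f
  induction f with
  | zero =>
    refine ⟨by intro n x d po h; rw [pvRef] at h; simp at h, ?_⟩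
    intro cs a x d po _ h
    match cs, a with
    | [], (x0, d0) =>
      rw [pvRefStep] at h
      simp only [Option.some.injEq, Prod.mk.injEq] at h
      obtain ⟨h1, h2, h3⟩ := h
      subst h3
      simp
    | c :: cs', (x0, d0) => rw [pvRefStep, pvRef] at h; simp at h
  | succ f ih =>
    obtain ⟨ihR, ihS⟩ := ih
    have hR : ∀ n x d po, pvRef nums (PySem.Dict.mk children) (f + 1) n = some (x, d, po) →
        po.length ≤ ((children.flatMap Prod.snd).length + 1) ^ (f + 1) := by
      intro n x d po h
      rw [pvRef] at h
      cases hg : PySem.List.pyGet? nums n with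
      | none => simp [hg] at h
      | some v =>
        cases hc : (PySem.Dict.mk children).get? n with
        | none => simp [hg, hc] at h
        | some cs =>
          cases hs : pvRefStep nums (PySem.Dict.mk children) f cs (v, ([] : PySem.Set Int)) with
          | none => simp [hg, hc, PySem.Set.empty_eq, hs] at h
          | some r' =>
            obtain ⟨x0, d0, po0⟩ := r'
            simp only [hg, hc, PySem.Set.empty_eq, hs, Option.some.injEq, Prod.mk.injEq] at h
            obtain ⟨h1, h2, h3⟩ := h
            subst h3
            have hmem : (n, cs) ∈ children := PySem.Dict.mem_items_of_get?_eq_some (PySem.Dict.mk children) hc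
            have hsub : ∀ c ∈ cs, c ∈ children.flatMap Prod.snd := by
              intro c hcin
              exact List.mem_flatMap.mpr ⟨(n, cs), hmem, hcin⟩
            have hlen0 := ihS cs _ _ _ _ hsub hs
            have hcslen : cs.length ≤ (children.flatMap Prod.snd).length := by
              have : cs.Sublist (children.flatMap Prod.snd) := by
                have hm : cs ∈ children.map Prod.snd := List.mem_map.mpr ⟨(n, cs), hmem, rfl⟩
                simpa [List.flatMap_def] using List.sublist_flatten_of_mem hm
              exact this.length_le
            have hp1 : 1 ≤ ((children.flatMap Prod.snd).length + 1) ^ f :=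
              Nat.one_le_pow _ _ (by omega)
            have hmul : cs.length * ((children.flatMap Prod.snd).length + 1) ^ f ≤
                (children.flatMap Prod.snd).length * ((children.flatMap Prod.snd).length + 1) ^ f :=
              Nat.mul_le_mul_right _ hcslen
            have hkey : po0.length + 1 ≤ ((children.flatMap Prod.snd).length + 1) ^ (f + 1) := by
              calc po0.length + 1
                  ≤ (children.flatMap Prod.snd).length * ((children.flatMap Prod.snd).length + 1) ^ f + 1 := by omega
                _ ≤ (children.flatMap Prod.snd).length * ((children.flatMap Prod.snd).length + 1) ^ f +
                    ((children.flatMap Prod.snd).length + 1) ^ f := by omega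
                _ = ((children.flatMap Prod.snd).length + 1) ^ (f + 1) := by ring
            simp only [List.length_append, List.length_cons, List.length_nil]
            omega
    refine ⟨hR, ?_⟩
    intro cs
    induction cs with
    | nil =>
      rintro ⟨x0, d0⟩ x d po _ h
      rw [pvRefStep] at h
      simp only [Option.some.injEq, Prod.mk.injEq] at h
      obtain ⟨h1, h2, h3⟩ := h
      subst h3
      simp
    | cons c cs' ihc =>
      rintro ⟨x0, d0⟩ x d po hcs h
      rw [pvRefStep] at h
      cases hrc : pvRef nums (PySem.Dict.mk children) (f+1) c with
      | none => simp [hrc] at h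
      | some rc =>
        obtain ⟨cx, cdv, cpo⟩ := rc
        cases hs : pvRefStep nums (PySem.Dict.mk children) (f+1) cs' (PySem.Int.bxor x0 cx, (PySem.Set.union d0 cdv).add c) with
        | none => simp [hrc, hs] at h
        | some r2 =>
          obtain ⟨x2, d2, po2⟩ := r2
          simp only [hrc, hs, Option.some.injEq, Prod.mk.injEq] at h
          obtain ⟨h1, h2, h3⟩ := h
          subst h3
          have hb1 := hR _ _ _ _ hrc
          have hb2 := ihc _ _ _ _ (fun c hc => hcs c (List.mem_cons_of_mem _ hc)) hs
          simp only [List.length_append, List.length_cons]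
          have : (cs'.length + 1) * ((children.flatMap Prod.snd).length + 1) ^ (f+1) =
              cs'.length * ((children.flatMap Prod.snd).length + 1) ^ (f+1) +
              ((children.flatMap Prod.snd).length + 1) ^ (f+1) := by ring
          omega

-- ---- saturation lemmas (about pvSatStep/pvSatIter, used to reason about Pre_) ----

theorem pv_foldl_upd_mono (cd : PySem.Dict Int (List Int)) (l : List Int) :
    ∀ (s : PySem.Set Int) (a : Int), a ∈ s →
      a ∈ l.foldl (fun acc u => PySem.Set.update acc ((cd.get? u).getD [])) s := by
  induction l with
  | nil => intro s a ha; exact ha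
  | cons u rest ih =>
    intro s a ha
    exact ih _ a (by rw [PySem.Set.mem_update]; exact Or.inl ha)

theorem pv_foldl_upd_entry (cd : PySem.Dict Int (List Int)) (l : List Int) :
    ∀ (s : PySem.Set Int) (u : Int), u ∈ l → ∀ c ∈ ((cd.get? u).getD []),
      c ∈ l.foldl (fun acc u => PySem.Set.update acc ((cd.get? u).getD [])) s := by
  induction l with
  | nil => intro s u hu; simp at hu
  | cons u0 rest ih =>
    intro s u hu c hc
    rcases List.mem_cons.mp hu with rfl | hu'
    · exact pv_foldl_upd_mono cd rest _ c (by rw [PySem.Set.mem_update]; exact Or.inr hc)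
    · exact ih _ u hu' c hc

theorem pv_foldl_upd_nodup (cd : PySem.Dict Int (List Int)) (l : List Int) :
    ∀ (s : PySem.Set Int), s.Nodup →
      (l.foldl (fun acc u => PySem.Set.update acc ((cd.get? u).getD [])) s).Nodup := by
  induction l with
  | nil => intro s h; exact h
  | cons u rest ih =>
    intro s h
    simp only [List.foldl_cons]
    exact ih _ (PySem.Set.nodup_update s _ h)

theorem pv_foldl_upd_subset (cd : PySem.Dict Int (List Int)) (l : List Int) :
    ∀ (s : PySem.Set Int) (a : Int),
      a ∈ l.foldl (fun acc u => PySem.Set.update acc ((cd.get? u).getD [])) s →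
      a ∈ s ∨ ∃ u ∈ l, a ∈ ((cd.get? u).getD []) := by
  induction l with
  | nil => intro s a h; exact Or.inl h
  | cons u rest ih =>
    intro s a h
    rcases ih _ a h with h' | ⟨u', hu', hau⟩
    · rw [PySem.Set.mem_update] at h'
      rcases h' with h'' | h''
      · exact Or.inl h''
      · exact Or.inr ⟨u, List.mem_cons_self, h''⟩
    · exact Or.inr ⟨u', List.mem_cons_of_mem _ hu', hau⟩

theorem pv_foldl_upd_shape (cd : PySem.Dict Int (List Int)) (l : List Int) :
    ∀ (s : PySem.Set Int), ∃ t,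
      l.foldl (fun acc u => PySem.Set.update acc ((cd.get? u).getD [])) s = s ++ t := by
  induction l with
  | nil => intro s; exact ⟨[], by simp⟩
  | cons u rest ih =>
    intro s
    obtain ⟨t1, ht1⟩ := ih (PySem.Set.update s ((cd.get? u).getD []))
    obtain ⟨t0, ht0⟩ : ∃ t0, PySem.Set.update s ((cd.get? u).getD []) = s ++ t0 :=
      ⟨_, PySem.Set.update_eq_append_filter s _⟩
    exact ⟨t0 ++ t1, by rw [List.foldl_cons, ht1, ht0, List.append_assoc]⟩

theorem pv_satstep_mem (cd : PySem.Dict Int (List Int)) (R : PySem.Set Int)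
    {k c : Int} {cs : List Int} (hg : cd.get? k = some cs) (hk : k ∈ R) (hc : c ∈ cs) :
    c ∈ pvSatStep cd R := by
  refine pv_foldl_upd_entry cd R R k hk c ?_
  rw [hg]; exact hc

theorem pv_iter_fixed (cd : PySem.Dict Int (List Int)) (R : PySem.Set Int)
    (h : pvSatStep cd R = R) : ∀ f, pvSatIter cd f R = R := by
  intro f
  induction f with
  | zero => rfl
  | succ f ih => rw [pvSatIter, h]; exact ih

theorem pv_sat_sat (cd : PySem.Dict Int (List Int)) (U : List Int)
    (hcl : ∀ u cs, cd.get? u = some cs → ∀ c ∈ cs, c ∈ U) :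
    ∀ (f : Nat) (R : PySem.Set Int), R.Nodup → (∀ a ∈ R, a ∈ U) →
      U.length < f + R.length →
      pvSatStep cd (pvSatIter cd f R) = pvSatIter cd f R ∧
        ∃ t, pvSatIter cd f R = R ++ t := by
  intro f
  induction f with
  | zero =>
    intro R hnd hsub hlt
    exfalso
    have := (List.subperm_of_subset hnd hsub).length_le
    omega
  | succ f ih =>
    intro R hnd hsub hlt
    by_cases hfix : pvSatStep cd R = R
    · have hit : pvSatIter cd (f + 1) R = R := pv_iter_fixed cd R hfix (f + 1)
      rw [hit]
      exact ⟨hfix, [], by simp⟩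
    · obtain ⟨t, ht⟩ := pv_foldl_upd_shape cd R R
      have htne : t ≠ [] := by
        intro h0
        rw [pvSatStep] at hfix
        rw [h0, List.append_nil] at ht
        exact hfix ht
      have hlen : R.length + 1 ≤ (pvSatStep cd R).length := by
        rw [pvSatStep, ht, List.length_append]
        have : 0 < t.length := List.length_pos_iff.mpr htne
        omega
      have hnd' : (pvSatStep cd R).Nodup := pv_foldl_upd_nodup cd R R hnd
      have hsub' : ∀ a ∈ pvSatStep cd R, a ∈ U := by
        intro a ha
        rcases pv_foldl_upd_subset cd R R a ha with h' | ⟨u, _, hau⟩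
        · exact hsub a h'
        · cases hgu : cd.get? u with
          | none => rw [hgu] at hau; simp at hau
          | some cs =>
            rw [hgu] at hau
            exact hcl u cs hgu a hau
      obtain ⟨hfix', ht'⟩ := ih (pvSatStep cd R) hnd' hsub' (by omega)
      refine ⟨hfix', ?_⟩
      obtain ⟨t2, ht2⟩ := ht'
      refine ⟨t ++ t2, ?_⟩
      have ht' : pvSatStep cd R = R ++ t := ht
      rw [pvSatIter, ht2, ht', List.append_assoc]

theorem pv_satiter_subset (cd : PySem.Dict Int (List Int)) (U : List Int)
    (hcl : ∀ u cs, cd.get? u = some cs → ∀ c ∈ cs, c ∈ U) :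
    ∀ (f : Nat) (R : PySem.Set Int), (∀ a ∈ R, a ∈ U) →
      ∀ a ∈ pvSatIter cd f R, a ∈ U := by
  intro f
  induction f with
  | zero => intro R h a ha; exact h a ha
  | succ f ih =>
    intro R h a ha
    refine ih (pvSatStep cd R) ?_ a ha
    intro b hb
    rcases pv_foldl_upd_subset cd R R b hb with h' | ⟨u, _, hbu⟩
    · exact h b h'
    · cases hgu : cd.get? u with
      | none => rw [hgu] at hbu; simp at hbu
      | some cs =>
        rw [hgu] at hbu
        exact hcl u cs hgu b hbu

-- the child-closure hypothesis holds for the dict of the input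
theorem pv_hcl (children : List (Int × List Int)) :
    ∀ u cs, (PySem.Dict.mk children).get? u = some cs →
      ∀ c ∈ cs, c ∈ (0 : Int) :: children.flatMap Prod.snd := by
  intro u cs hg c hc
  have hmem : (u, cs) ∈ children := PySem.Dict.mem_items_of_get?_eq_some (PySem.Dict.mk children) hg
  exact List.mem_cons_of_mem _ (List.mem_flatMap.mpr ⟨(u, cs), hmem, hc⟩)

theorem pv_reach_fixed (children : List (Int × List Int)) :
    pvSatStep (PySem.Dict.mk children) (pvReach children) = pvReach children := by
  have h := pv_sat_sat (PySem.Dict.mk children) ((0 : Int) :: children.flatMap Prod.snd)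
    (pv_hcl children) ((children.flatMap Prod.snd).length + 2) [0]
    (by simp) (by intro a ha; simp only [List.mem_singleton] at ha; subst ha; exact List.mem_cons_self)
    (by simp)
  exact h.1

theorem pv_reach_zero (children : List (Int × List Int)) : (0 : Int) ∈ pvReach children := by
  have h := pv_sat_sat (PySem.Dict.mk children) ((0 : Int) :: children.flatMap Prod.snd)
    (pv_hcl children) ((children.flatMap Prod.snd).length + 2) [0]
    (by simp) (by intro a ha; simp only [List.mem_singleton] at ha; subst ha; exact List.mem_cons_self)
    (by simp)
  obtain ⟨t, ht⟩ := h.2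
  rw [pvReach, ht]
  exact List.mem_append.mpr (Or.inl List.mem_cons_self)

theorem pv_reach_closed (children : List (Int × List Int)) {k c : Int} {cs : List Int}
    (hg : (PySem.Dict.mk children).get? k = some cs) (hk : k ∈ pvReach children) (hc : c ∈ cs) :
    c ∈ pvReach children := by
  rw [← pv_reach_fixed children]
  exact pv_satstep_mem (PySem.Dict.mk children) _ hg hk hc

theorem pv_reach_subset (children : List (Int × List Int)) :
    ∀ a ∈ pvReach children, a ∈ (0 : Int) :: children.flatMap Prod.snd := by
  intro a ha
  refine pv_satiter_subset (PySem.Dict.mk children) _ (pv_hcl children) _ [0] ?_ a ha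
  intro b hb
  simp only [List.mem_singleton] at hb
  subst hb
  exact List.mem_cons_self

theorem pv_descOf_seed (children : List (Int × List Int)) {v c : Int} {cs : List Int}
    (hg : (PySem.Dict.mk children).get? v = some cs) (hc : c ∈ cs) :
    c ∈ pvDescOf children v := by
  have h := pv_sat_sat (PySem.Dict.mk children) ((0 : Int) :: children.flatMap Prod.snd)
    (pv_hcl children) ((children.flatMap Prod.snd).length + 2)
    (PySem.Set.ofList (((PySem.Dict.mk children).get? v).getD []))
    (PySem.Set.nodup_ofList _)
    (by
      intro a ha
      rw [PySem.Set.mem_ofList, hg] at ha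
      exact pv_hcl children v cs hg a ha)
    (by simp only [List.length_cons]; omega)
  obtain ⟨t, ht⟩ := h.2
  rw [pvDescOf, ht]
  refine List.mem_append.mpr (Or.inl ?_)
  rw [PySem.Set.mem_ofList, hg]
  exact hc

theorem pv_descOf_fixed (children : List (Int × List Int)) (v : Int) :
    pvSatStep (PySem.Dict.mk children) (pvDescOf children v) = pvDescOf children v := by
  have h := pv_sat_sat (PySem.Dict.mk children) ((0 : Int) :: children.flatMap Prod.snd)
    (pv_hcl children) ((children.flatMap Prod.snd).length + 2)
    (PySem.Set.ofList (((PySem.Dict.mk children).get? v).getD []))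
    (PySem.Set.nodup_ofList _)
    (by
      intro a ha
      rw [PySem.Set.mem_ofList] at ha
      cases hgv : (PySem.Dict.mk children).get? v with
      | none => rw [hgv] at ha; simp at ha
      | some cs =>
        rw [hgv] at ha
        exact pv_hcl children v cs hgv a ha)
    (by simp only [List.length_cons]; omega)
  exact h.1

theorem pv_descOf_closed (children : List (Int × List Int)) {v k c : Int} {cs : List Int}
    (hg : (PySem.Dict.mk children).get? k = some cs) (hk : k ∈ pvDescOf children v) (hc : c ∈ cs) :
    c ∈ pvDescOf children v := by
  rw [← pv_descOf_fixed children v]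
  exact pv_satstep_mem (PySem.Dict.mk children) _ hg hk hc

-- ---- paths from the root (termination / existence argument) ----

def pvPathOK (cd : PySem.Dict Int (List Int)) : List Int → Prop
  | [] => False
  | [n] => n = 0
  | c :: n :: rest => (∃ cs, cd.get? n = some cs ∧ c ∈ cs) ∧ pvPathOK cd (n :: rest)

theorem pv_path_reach (children : List (Int × List Int)) :
    ∀ l, pvPathOK (PySem.Dict.mk children) l → ∀ v ∈ l, v ∈ pvReach children := by
  intro l
  induction l with
  | nil => intro _ v hv; simp at hv
  | cons a rest ih =>
    intro h v hv
    cases rest with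
    | nil =>
      rw [pvPathOK] at h
      have : v = a := by simpa using hv
      subst this; subst h
      exact pv_reach_zero children
    | cons b rest' =>
      rw [pvPathOK] at h
      obtain ⟨⟨cs, hcs, hacs⟩, hp⟩ := h
      rcases List.mem_cons.mp hv with rfl | hv'
      · exact pv_reach_closed children hcs (ih hp b List.mem_cons_self) hacs
      · exact ih hp v hv'

theorem pv_path_desc (children : List (Int × List Int)) :
    ∀ l a, pvPathOK (PySem.Dict.mk children) (a :: l) →
      ∀ v ∈ l, a ∈ pvDescOf children v := by
  intro l
  induction l with
  | nil => intro a _ v hv; simp at hv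
  | cons b rest ih =>
    intro a h v hv
    rw [pvPathOK] at h
    obtain ⟨⟨cs, hcs, hacs⟩, hp⟩ := h
    rcases List.mem_cons.mp hv with rfl | hv'
    · exact pv_descOf_seed children hcs hacs
    · have hb : b ∈ pvDescOf children v := ih b hp v hv'
      exact pv_descOf_closed children hcs hb hacs

theorem pv_path_nodup (nums : List Int) (children : List (Int × List Int))
    (hpre : Pre_precompute_with_dfs nums children) :
    ∀ l, pvPathOK (PySem.Dict.mk children) l → l.Nodup := by
  intro l
  induction l with
  | nil => intro _; simp
  | cons a rest ih =>
    intro h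
    have hrest : rest.Nodup := by
      cases rest with
      | nil => simp
      | cons b rest' =>
        rw [pvPathOK] at h
        exact ih h.2
    refine List.nodup_cons.mpr ⟨?_, hrest⟩
    intro hmem
    have haR : a ∈ pvReach children :=
      pv_path_reach children _ h a List.mem_cons_self
    have hdesc : a ∈ pvDescOf children a := pv_path_desc children rest a h a hmem
    exact (hpre a haR).2.2 hdesc

theorem pv_path_len (nums : List Int) (children : List (Int × List Int))
    (hpre : Pre_precompute_with_dfs nums children) :
    ∀ l, pvPathOK (PySem.Dict.mk children) l →
      l.length ≤ (children.flatMap Prod.snd).length + 1 := by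
  intro l hp
  have hnd := pv_path_nodup nums children hpre l hp
  have hsub : l ⊆ (0 : Int) :: children.flatMap Prod.snd := by
    intro v hv
    exact pv_reach_subset children v (pv_path_reach children l hp v hv)
  have := (List.subperm_of_subset hnd hsub).length_le
  simpa using this

-- on Pre_ inputs the reference computation returns, at fuel |flatMap| + 1
theorem pv_ex (nums : List Int) (children : List (Int × List Int))
    (hpre : Pre_precompute_with_dfs nums children) :
    ∀ f : Nat,
      (∀ n anc, pvPathOK (PySem.Dict.mk children) (n :: anc) →
        (children.flatMap Prod.snd).length + 1 < f + (n :: anc).length →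
        ∃ r, pvRef nums (PySem.Dict.mk children) f n = some r) ∧
      (∀ n anc cs0, pvPathOK (PySem.Dict.mk children) (n :: anc) →
        (PySem.Dict.mk children).get? n = some cs0 →
        (children.flatMap Prod.snd).length + 1 < (f + 1) + (n :: anc).length →
        ∀ cs, (∀ c ∈ cs, c ∈ cs0) → ∀ a,
          ∃ r, pvRefStep nums (PySem.Dict.mk children) f cs a = some r) := by
  intro f
  induction f with
  | zero =>
    constructor
    · intro n anc hp hlt
      exfalso
      have := pv_path_len nums children hpre _ hp
      omega
    · intro n anc cs0 hp hg hlt cs hcs a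
      match cs, a with
      | [], (x, d) => exact ⟨(x, d, []), by rw [pvRefStep]⟩
      | c :: cs', (x, d) =>
        exfalso
        have hcin : c ∈ cs0 := hcs c List.mem_cons_self
        have hpc : pvPathOK (PySem.Dict.mk children) (c :: n :: anc) := by
          rw [pvPathOK]; exact ⟨⟨cs0, hg, hcin⟩, hp⟩
        have := pv_path_len nums children hpre _ hpc
        simp only [List.length_cons] at this hlt
        omega
  | succ f ih =>
    obtain ⟨ihR, ihS⟩ := ih
    have hR : ∀ n anc, pvPathOK (PySem.Dict.mk children) (n :: anc) →
        (children.flatMap Prod.snd).length + 1 < (f + 1) + (n :: anc).length →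
        ∃ r, pvRef nums (PySem.Dict.mk children) (f + 1) n = some r := by
      intro n anc hp hlt
      have hnR : n ∈ pvReach children :=
        pv_path_reach children _ hp n List.mem_cons_self
      obtain ⟨cs0, hgo⟩ := Option.isSome_iff_exists.mp (hpre n hnR).1
      obtain ⟨v, hvget⟩ := Option.isSome_iff_exists.mp (hpre n hnR).2.1
      obtain ⟨r, hstep⟩ := ihS n anc cs0 hp hgo (by omega) cs0 (fun c h => h)
        (v, ([] : PySem.Set Int))
      obtain ⟨x, d, po⟩ := r
      refine ⟨(x, d, po ++ [(n, x, d)]), ?_⟩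
      rw [pvRef]
      simp only [hvget, hgo, PySem.Set.empty_eq, hstep]
    refine ⟨hR, ?_⟩
    intro n anc cs0 hp hg hlt cs
    induction cs with
    | nil =>
      rintro _ ⟨x, d⟩
      exact ⟨(x, d, []), by rw [pvRefStep]⟩
    | cons c cs' ihcs =>
      rintro hcs ⟨x, d⟩
      have hcin : c ∈ cs0 := hcs c List.mem_cons_self
      have hpc : pvPathOK (PySem.Dict.mk children) (c :: n :: anc) := by
        rw [pvPathOK]; exact ⟨⟨cs0, hg, hcin⟩, hp⟩
      obtain ⟨rc, hrc⟩ := hR c (n :: anc) hpc (by simp only [List.length_cons] at hlt ⊢; omega)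
      obtain ⟨cx, cdv, cpo⟩ := rc
      obtain ⟨r2, hr2⟩ := ihcs (fun c' h => hcs c' (List.mem_cons_of_mem _ h))
        (PySem.Int.bxor x cx, (PySem.Set.union d cdv).add c)
      obtain ⟨x2, d2, po2⟩ := r2
      refine ⟨(x2, d2, cpo ++ po2), ?_⟩
      rw [pvRefStep]
      simp only [hrc, hr2]

-- ===== VERDICT (by name: the statement is the Claim_ definition above) =====
theorem precompute_with_dfs_spec : Claim_equal_precompute_with_dfs := by
  unfold Claim_equal_precompute_with_dfs
  intro nums children _ hpre
  unfold Spec_precompute_with_dfs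
  have hp0 : pvPathOK (PySem.Dict.mk children) [0] := by rw [pvPathOK]
  obtain ⟨r, hr⟩ := (pv_ex nums children hpre ((children.flatMap Prod.snd).length + 1)).1 0 []
    hp0 (by simp)
  obtain ⟨x, d, po⟩ := r
  have ha := (pv_achar nums (PySem.Dict.mk children) ((children.flatMap Prod.snd).length + 1)).1 0
    PySem.Dict.empty PySem.Dict.empty
  rw [hr] at ha
  simp only [Option.map_some] at ha
  -- unfold the top pvRef call
  have hr' := hr
  rw [pvRef] at hr'
  cases hg : PySem.List.pyGet? nums 0 with
  | none => simp only [hg] at hr'; cases hr'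
  | some v =>
    cases hc : (PySem.Dict.mk children).get? 0 with
    | none => simp only [hg, hc] at hr'; cases hr'
    | some cs =>
      cases hs : pvRefStep nums (PySem.Dict.mk children) ((children.flatMap Prod.snd).length) cs
          (v, PySem.Set.empty) with
      | none => simp only [hg, hc, hs] at hr'; cases hr'
      | some r0 =>
        obtain ⟨x0, d0, po0⟩ := r0
        simp only [hg, hc, hs, Option.some.injEq, Prod.mk.injEq] at hr'
        obtain ⟨h1, h2, h3⟩ := hr'
        subst h1; subst h2
        have hlenpo := (pv_len nums children ((children.flatMap Prod.snd).length + 1)).1 0 _ _ _ hr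
        have hpo0 : po0.length + 1 = po.length := by
          rw [← h3]; simp
        have hbound : po.length ≤
            ((children.flatMap Prod.snd).length + 2) ^ ((children.flatMap Prod.snd).length + 1) :=
          le_trans hlenpo (Nat.pow_le_pow_left (by omega) _)
        set F := 2 * ((children.flatMap Prod.snd).length + 2) ^ ((children.flatMap Prod.snd).length + 1) + 1 with hF
        obtain ⟨g, hg1, hgF⟩ : ∃ g, 1 ≤ g ∧ F = 2 * po0.length + g := by
          refine ⟨F - 2 * po0.length, by omega, by omega⟩
        have hsim := (pv_sim nums (PySem.Dict.mk children) ((children.flatMap Prod.snd).length)).2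
          cs v PySem.Set.empty x0 d0 po0 hs 0 [] PySem.Dict.empty PySem.Dict.empty g
        obtain ⟨g', hg'⟩ : ∃ g', g = g' + 1 := ⟨g - 1, by omega⟩
        show precompute_with_dfs nums children = precompute_with_dfs_alt nums children
        rw [precompute_with_dfs, precompute_with_dfs_alt]
        simp only [ha, hg, hc]
        rw [← hF, hgF, hsim, hg', pvRunB_pop_last,
          ← h3, pvInsX_append, pvInsD_append, pvInsX_singleton, pvInsD_singleton]
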